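-- pv_equiv track=rewrite | github.com/alexandraback/datacollection | solutions_5634697451274240_1/Python/michaf/script.py | solve_count
-- ===== SOURCE A (Python) =====
-- def solve_count(d):
--     count = 0
--     for i in range(1, len(d)):
--         if d[i-1] != d[i]:
--             count += 1
--     if not d[-1]:
--         count += 1
--     return count
-- ===== SOURCE B (Python) =====
-- def _trans(d, lo, hi):
--     # adjacent-difference count inside d[lo:hi], by divide and conquer:
--     # split at the midpoint, recurse on both halves, add the boundary pair.
--     if hi - lo < 2:
--         return 0
--     mid = (lo + hi) // 2
--     return _trans(d, lo, mid) + _trans(d, mid, hi) + (d[mid - 1] != d[mid])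
--
-- def solve_count(d):
--     return _trans(d, 0, len(d)) + (not d[-1])
-- ===== Notes on version B (the rewrite author's own statement) =====
-- stated objective: alternative
-- what changed: B counts adjacent differences by divide and conquer on index intervals (recursively split at the midpoint and add the boundary comparison) instead of A's single indexed loop with a counter.
-- outside the precondition, e.g. on solve_count([]): A raises IndexError, B raises IndexError
import Mathlib
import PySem

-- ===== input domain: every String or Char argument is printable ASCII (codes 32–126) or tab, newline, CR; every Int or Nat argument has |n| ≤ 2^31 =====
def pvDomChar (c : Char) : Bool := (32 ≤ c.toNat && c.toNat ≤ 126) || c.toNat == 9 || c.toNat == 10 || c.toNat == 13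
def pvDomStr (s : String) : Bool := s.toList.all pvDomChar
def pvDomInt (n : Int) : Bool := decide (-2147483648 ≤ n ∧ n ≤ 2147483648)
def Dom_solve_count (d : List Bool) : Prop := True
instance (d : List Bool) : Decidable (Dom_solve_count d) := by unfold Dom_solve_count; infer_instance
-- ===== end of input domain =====

-- B counts adjacent differences by divide and conquer on index intervals (midpoint split
-- plus boundary comparison) instead of A's single indexed loop; same O(n) cost (objective: alternative).


-- ===== PORT A =====
-- for i in range(1, len(d)): if d[i-1] != d[i]: count += 1   (indices are in range inside the
-- loop, so pyGetD with a default is exact there); then the trailing d[-1] test via pyGet?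
-- (none = IndexError, excluded by Pre_).
def solve_count (d : List Bool) : Int :=
  let count : Int :=
    (PySem.List.pyRange 1 (d.length : Int) 1).foldl
      (fun count i =>
        if PySem.List.pyGetD d (i - 1) false ≠ PySem.List.pyGetD d i false then count + 1 else count)
      0
  if PySem.List.pyGet? d (-1) = some false then count + 1 else count

-- ===== PORT B =====
-- _trans(d, lo, hi): divide and conquer on the interval [lo, hi).  The Python indices lo, hi
-- are always ≥ 0 (only 0 and len(d) and midpoints are reached), so Nat is exact, and
-- (lo+hi)//2 = Nat division; d[mid-1], d[mid] are in range there (getD is exact).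
def pvTrans (d : List Bool) (lo hi : Nat) : Int :=
  if hi - lo < 2 then 0
  else
    let mid := (lo + hi) / 2
    pvTrans d lo mid + pvTrans d mid hi +
      (if d[mid - 1]?.getD false ≠ d[mid]?.getD false then 1 else 0)
termination_by hi - lo
decreasing_by all_goals omega

def solve_count_alt (d : List Bool) : Int :=
  pvTrans d 0 d.length + (if PySem.List.pyGet? d (-1) = some false then 1 else 0)

-- ===== PRECONDITION & SPEC =====
-- Pre_ excludes only the empty list, on which both Pythons raise IndexError at d[-1].
def Pre_solve_count (d : List Bool) : Prop := d ≠ []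
instance (d : List Bool) : Decidable (Pre_solve_count d) := by unfold Pre_solve_count; infer_instance
def pvWitness_solve_count : List Bool := [true, false, false]

def Spec_solve_count (d : List Bool) (out : Int) : Prop := out = solve_count_alt d
instance (d : List Bool) (out : Int) : Decidable (Spec_solve_count d out) := by
  unfold Spec_solve_count; infer_instance

-- ===== CLAIM =====
def Claim_equal_solve_count : Prop :=
  ∀ (d : List Bool), Dom_solve_count d → Pre_solve_count d → Spec_solve_count d (solve_count d)

-- ===== LEMMAS AND PROOFS =====

theorem pvWitness_ok : Dom_solve_count pvWitness_solve_count ∧ Pre_solve_count pvWitness_solve_count := by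
  constructor <;> decide

-- whether positions k and k+1 differ
def pvNe (d : List Bool) (k : Nat) : Bool :=
  d[k]?.getD false != d[k + 1]?.getD false

-- common reference: sum of the pair indicators for k ∈ [lo, hi-1)
def pvG (d : List Bool) (lo hi : Nat) : Int :=
  ((List.range' lo (hi - lo - 1)).map (fun k => if pvNe d k then (1 : Int) else 0)).sum

lemma pvRange'_split (s a b : Nat) :
    List.range' s (a + b) = List.range' s a ++ List.range' (s + a) b := by
  rw [← List.range'_append_1]

-- B's divide and conquer computes pvG
lemma pvTrans_eq_G (d : List Bool) (lo hi : Nat) : pvTrans d lo hi = pvG d lo hi := by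
  generalize hfuel : hi - lo = n
  induction n using Nat.strong_induction_on generalizing lo hi with
  | _ n ih =>
    rw [pvTrans]
    by_cases hsmall : hi - lo < 2
    · rw [if_pos hsmall]
      have h0 : hi - lo - 1 = 0 := by omega
      simp [pvG, h0]
    · rw [if_neg hsmall]
      show pvTrans d lo ((lo + hi) / 2) + pvTrans d ((lo + hi) / 2) hi +
          (if d[(lo + hi) / 2 - 1]?.getD false ≠ d[(lo + hi) / 2]?.getD false then (1 : Int) else 0)
        = pvG d lo hi
      set mid := (lo + hi) / 2 with hmid
      have h1 : lo < mid := by omega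
      have h2 : mid < hi := by omega
      have e1 : pvTrans d lo mid = pvG d lo mid := ih (mid - lo) (by omega) lo mid rfl
      have e2 : pvTrans d mid hi = pvG d mid hi := ih (hi - mid) (by omega) mid hi rfl
      rw [e1, e2]
      unfold pvG
      have hsplit : List.range' lo (hi - lo - 1)
          = List.range' lo (mid - lo - 1) ++ (mid - 1) :: List.range' mid (hi - mid - 1) := by
        have ha : hi - lo - 1 = (mid - lo - 1) + (1 + (hi - mid - 1)) := by omega
        have hb : lo + (mid - lo - 1) = mid - 1 := by omega
        have hc : (mid - 1) + 1 = mid := by omega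
        rw [ha, pvRange'_split, hb, pvRange'_split, hc]
        simp
      rw [hsplit]
      have hne : (if d[mid - 1]?.getD false ≠ d[mid]?.getD false then (1 : Int) else 0)
          = (if pvNe d (mid - 1) then (1 : Int) else 0) := by
        have : (mid - 1) + 1 = mid := by omega
        simp [pvNe, this, bne_iff_ne]
      rw [hne]
      simp only [List.map_append, List.map_cons, List.sum_append, List.sum_cons]
      ring

lemma pvSum_ind_eq_countP (p : Nat → Bool) (l : List Nat) :
    (l.map (fun k => if p k then (1 : Int) else 0)).sum = (l.countP p : Int) := by
  induction l with
  | nil => simp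
  | cons x t ih =>
    by_cases hx : p x <;> simp [hx, ih]; ring

-- A's loop computes pvG d 0 d.length
lemma pvAloop_eq_G (d : List Bool) :
    (PySem.List.pyRange 1 (d.length : Int) 1).foldl
      (fun count i =>
        if PySem.List.pyGetD d (i - 1) false ≠ PySem.List.pyGetD d i false then count + 1 else count)
      0 = pvG d 0 d.length := by
  rw [PySem.List.pyRange_one]
  have hlen : (((d.length : ℕ) : Int) - 1).toNat = d.length - 1 := by omega
  rw [hlen, List.foldl_map]
  have hfun : (fun (count : Int) (k : ℕ) =>
      if PySem.List.pyGetD d ((1 : Int) + (k : Int) - 1) false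
        ≠ PySem.List.pyGetD d ((1 : Int) + (k : Int)) false then count + 1 else count)
      = (fun (count : Int) (k : ℕ) => if pvNe d k then count + 1 else count) := by
    funext count k
    have hi1 : (1 : Int) + (k : Int) - 1 = ((k : ℕ) : Int) := by omega
    have hi2 : (1 : Int) + (k : Int) = ((k + 1 : ℕ) : Int) := by omega
    rw [hi1, hi2]
    simp only [PySem.List.pyGetD_natCast, List.getD_eq_getElem?_getD, pvNe, bne_iff_ne]
  rw [hfun, PySem.List.foldl_if_add_one]
  rw [pvG]
  have : d.length - 0 - 1 = d.length - 1 := by omega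
  rw [this, ← List.range_eq_range', pvSum_ind_eq_countP]
  ring

-- ===== VERDICT =====
theorem solve_count_spec : Claim_equal_solve_count := by
  intro d _ _
  unfold Spec_solve_count solve_count solve_count_alt
  rw [pvAloop_eq_G d, pvTrans_eq_G d 0 d.length]
  by_cases hlast : PySem.List.pyGet? d (-1) = some false <;> simp [hlast]
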